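-- pv_equiv track=rewrite | github.com/nkran/guido | guido/off_targets.py | calculate_ot_sum_score
-- ===== SOURCE A (Python) =====
-- def calculate_ot_sum_score(
--     off_targets, ot_mismatch_weights=[10, 5, 4, 3, 1], pam="NGG"
-- ):
--     """Calculate sum score for a list of off-targets."""
--     return sum(
--         [
--             ot_mismatch_weights[len(ot["mismatches"]) - pam.count("N")]
--             for ot in off_targets
--         ]
--     )
-- ===== SOURCE B (Python) =====
-- def calculate_ot_sum_score(
--     off_targets, ot_mismatch_weights=[10, 5, 4, 3, 1], pam="NGG"
-- ):
--     """Calculate sum score for a list of off-targets."""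
--     n = pam.count("N")
--     hist = {}
--     for ot in off_targets:
--         idx = len(ot["mismatches"]) - n
--         hist[idx] = hist.get(idx, 0) + 1
--     total = 0
--     for idx, cnt in hist.items():
--         total += ot_mismatch_weights[idx] * cnt
--     return total
-- ===== Notes on version B (the rewrite author's own statement) =====
-- stated objective: alternative
-- what changed: B first builds a frequency histogram keyed by the mismatch-count index and then sums weight*count over the histogram, instead of A's per-element weighted sum over every off-target.
import Mathlib
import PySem

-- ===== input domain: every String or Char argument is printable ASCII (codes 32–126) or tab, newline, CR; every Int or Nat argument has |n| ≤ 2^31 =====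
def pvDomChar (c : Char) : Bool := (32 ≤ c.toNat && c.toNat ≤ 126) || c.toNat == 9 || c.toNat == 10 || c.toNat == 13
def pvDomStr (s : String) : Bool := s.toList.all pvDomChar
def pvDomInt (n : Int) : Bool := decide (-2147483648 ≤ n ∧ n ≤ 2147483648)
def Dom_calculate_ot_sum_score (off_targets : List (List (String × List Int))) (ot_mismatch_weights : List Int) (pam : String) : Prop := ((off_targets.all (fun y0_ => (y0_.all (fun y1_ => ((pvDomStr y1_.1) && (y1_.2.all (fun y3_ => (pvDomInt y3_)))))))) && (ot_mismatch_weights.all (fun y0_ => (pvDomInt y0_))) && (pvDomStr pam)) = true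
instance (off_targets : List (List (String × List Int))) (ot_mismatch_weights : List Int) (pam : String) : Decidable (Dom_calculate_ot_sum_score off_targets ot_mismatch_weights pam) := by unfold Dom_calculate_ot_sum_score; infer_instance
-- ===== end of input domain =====

-- B builds a histogram over the index len(ot["mismatches"]) - pam.count("N") and sums
-- weight*count over the histogram, instead of A's per-element weighted sum (objective: alternative).

-- the index computed for one off-target (used by both ports, as both Pythons compute it)
def pvOtIdx (pam : String) (ot : List (String × List Int)) : Int :=
  (((((PySem.Dict.mk ot).get? "mismatches").getD []).length : Int)) - ((PySem.Str.count pam "N" : Int))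

-- ===== PORT A =====
def calculate_ot_sum_score (off_targets : List (List (String × List Int))) (ot_mismatch_weights : List Int) (pam : String) : Int :=
  (off_targets.map (fun ot =>
    (PySem.List.pyGet? ot_mismatch_weights (pvOtIdx pam ot)).getD 0)).sum

-- ===== PORT B =====
def calculate_ot_sum_score_alt (off_targets : List (List (String × List Int))) (ot_mismatch_weights : List Int) (pam : String) : Int :=
  let hist : PySem.Dict Int Int :=
    off_targets.foldl (fun d ot =>
      d.insert (pvOtIdx pam ot) (d.getD (pvOtIdx pam ot) 0 + 1)) PySem.Dict.empty
  hist.items.foldl (fun total kv =>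
    total + (PySem.List.pyGet? ot_mismatch_weights kv.1).getD 0 * kv.2) 0

-- ===== PRECONDITION & SPEC =====
-- Pre_: every off-target dict has the key "mismatches" (else A raises KeyError) and the
-- resulting index is a valid Python index into the weights list (else A raises IndexError).
def Pre_calculate_ot_sum_score (off_targets : List (List (String × List Int))) (ot_mismatch_weights : List Int) (pam : String) : Prop :=
  ∀ ot ∈ off_targets, ((PySem.Dict.mk ot).get? "mismatches").isSome = true ∧
    PySem.Raise.InRange ot_mismatch_weights.length (pvOtIdx pam ot)
instance (off_targets : List (List (String × List Int))) (ot_mismatch_weights : List Int) (pam : String) : Decidable (Pre_calculate_ot_sum_score off_targets ot_mismatch_weights pam) := by unfold Pre_calculate_ot_sum_score; infer_instance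

def pvWitness_calculate_ot_sum_score : (List (List (String × List Int))) × List Int × String :=
  ([[("mismatches", [1, 2])], [("mismatches", [3])]], [10, 5, 4, 3, 1], "NGG")

def Spec_calculate_ot_sum_score (off_targets : List (List (String × List Int))) (ot_mismatch_weights : List Int) (pam : String) (out : Int) : Prop := out = calculate_ot_sum_score_alt off_targets ot_mismatch_weights pam
instance (off_targets : List (List (String × List Int))) (ot_mismatch_weights : List Int) (pam : String) (out : Int) : Decidable (Spec_calculate_ot_sum_score off_targets ot_mismatch_weights pam out) := by unfold Spec_calculate_ot_sum_score; infer_instance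

-- ===== CLAIM (what is proved, stated in full; the proofs are below) =====
def Claim_equal_calculate_ot_sum_score : Prop := ∀ (off_targets : List (List (String × List Int))) (ot_mismatch_weights : List Int) (pam : String), Dom_calculate_ot_sum_score off_targets ot_mismatch_weights pam → Pre_calculate_ot_sum_score off_targets ot_mismatch_weights pam → Spec_calculate_ot_sum_score off_targets ot_mismatch_weights pam (calculate_ot_sum_score off_targets ot_mismatch_weights pam)

-- ===== LEMMAS AND PROOFS =====

-- summing the indicator "if k = a then f k else 0" over a nodup list containing a gives f a
lemma pv_sum_indicator (f : Int → Int) (S : List Int) (a : Int)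
    (hnd : S.Nodup) (ha : a ∈ S) :
    (S.map (fun k => if k = a then f k else 0)).sum = f a := by
  induction S with
  | nil => cases ha
  | cons x xs ih =>
    simp only [List.map_cons, List.sum_cons]
    rcases List.mem_cons.mp ha with rfl | hmem
    · have hx : a ∉ xs := (List.nodup_cons.mp hnd).1
      have h0 : (xs.map (fun k => if k = a then f k else 0)).sum = 0 := by
        apply List.sum_eq_zero
        intro v hv
        obtain ⟨k, hk, rfl⟩ := List.mem_map.mp hv
        exact if_neg (by rintro rfl; exact hx hk)
      rw [h0, if_pos rfl, add_zero]
    · have hx : x ≠ a := by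
        rintro rfl; exact (List.nodup_cons.mp hnd).1 hmem
      rw [if_neg hx, ih (List.nodup_cons.mp hnd).2 hmem]
      ring

-- group-then-reduce equals the direct weighted sum
lemma pv_group_sum (f : Int → Int) (S idxs : List Int)
    (hnd : S.Nodup) (hsub : ∀ x ∈ idxs, x ∈ S) :
    (S.map (fun k => f k * (idxs.count k : Int))).sum = (idxs.map f).sum := by
  induction idxs with
  | nil => simp
  | cons a rest ih =>
    have hrest : ∀ x ∈ rest, x ∈ S := fun x hx => hsub x (List.mem_cons_of_mem a hx)
    have hsplit : ∀ k : Int, f k * ((a :: rest).count k : Int)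
        = f k * (rest.count k : Int) + (if k = a then f k else 0) := by
      intro k
      rcases eq_or_ne k a with rfl | hk
      · simp [List.count_cons_self]; ring
      · simp [List.count_cons_of_ne (Ne.symm hk), hk]
    calc (S.map (fun k => f k * ((a :: rest).count k : Int))).sum
        = (S.map (fun k => f k * (rest.count k : Int) + (if k = a then f k else 0))).sum := by
          congr 1; exact List.map_congr_left (fun k _ => hsplit k)
      _ = (S.map (fun k => f k * (rest.count k : Int))).sum
            + (S.map (fun k => if k = a then f k else 0)).sum := by
          rw [← List.sum_map_add]
      _ = (rest.map f).sum + f a := by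
          rw [ih hrest, pv_sum_indicator f S a hnd (hsub a (List.mem_cons_self))]
      _ = ((a :: rest).map f).sum := by simp; ring

-- ===== VERDICT (by name: the statement is the Claim_ definition above) =====
theorem calculate_ot_sum_score_spec : Claim_equal_calculate_ot_sum_score := by
  intro off_targets w pam _ _
  have hhist : off_targets.foldl (fun d ot =>
      d.insert (pvOtIdx pam ot) (d.getD (pvOtIdx pam ot) 0 + 1)) PySem.Dict.empty
      = PySem.Dict.counter (off_targets.map (pvOtIdx pam)) := by
    rw [← PySem.Dict.foldl_insert_getD_add_one_eq_counter, List.foldl_map]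
  unfold Spec_calculate_ot_sum_score calculate_ot_sum_score calculate_ot_sum_score_alt
  dsimp only
  rw [hhist, PySem.List.foldl_add _
        (fun kv : Int × Int => (PySem.List.pyGet? w kv.1).getD 0 * kv.2) 0,
      PySem.Dict.items_counter, List.map_map, zero_add]
  have hgrp := pv_group_sum (fun i => (PySem.List.pyGet? w i).getD 0)
      (PySem.Set.ofList (off_targets.map (pvOtIdx pam))) (off_targets.map (pvOtIdx pam))
      (PySem.Set.nodup_ofList _) (fun x hx => (PySem.Set.mem_ofList _ x).mpr hx)
  simp only [Function.comp_def]
  rw [hgrp, List.map_map]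
  simp [Function.comp_def]
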